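-- pv_equiv track=rewrite | github.com/ShowiGore/Connect4 | Python/connectN.py | build_enumeration
-- ===== SOURCE A (Python) =====
-- def build_enumeration(width):
--     columns = [[d for d in str(x)] for x in range(1, width + 1)]
--     s = ""
--     for d in range(len(columns[width - 1])):
--         for n in range(width):
--             if len(columns[n]) > d:
--                 s += " " + columns[n][d] + " "
--             else:
--                 s += "   "
--         s += "\n"
--     return s
-- ===== SOURCE B (Python) =====
-- def build_enumeration(width):
--     nums = [str(x) for x in range(1, width + 1)]
--     maxd = len(nums[-1])
--     padded = [n.ljust(maxd) for n in nums]
--     return "".join(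
--         "".join(" " + ch + " " for ch in row) + "\n"
--         for row in zip(*padded)
--     )
-- ===== Notes on version B (the rewrite author's own statement) =====
-- stated objective: simpler
-- what changed: B replaces A's index-driven nested loops with a per-cell length test by left-justifying each number string to the width of the last one and transposing the padded strings with zip(*), so each row is emitted as a plain character slice with no conditional.
-- outside the precondition, e.g. on build_enumeration(0): A raises IndexError, B raises IndexError
import Mathlib
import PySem

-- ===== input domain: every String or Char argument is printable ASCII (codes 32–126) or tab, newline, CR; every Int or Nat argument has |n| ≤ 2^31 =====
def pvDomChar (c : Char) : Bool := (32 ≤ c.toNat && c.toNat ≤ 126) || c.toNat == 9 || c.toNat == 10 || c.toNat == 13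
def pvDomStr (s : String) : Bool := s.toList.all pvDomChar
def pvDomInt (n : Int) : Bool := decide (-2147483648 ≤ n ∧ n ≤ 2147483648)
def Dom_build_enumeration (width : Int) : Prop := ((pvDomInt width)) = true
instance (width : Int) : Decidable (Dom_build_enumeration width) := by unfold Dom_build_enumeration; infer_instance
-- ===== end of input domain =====

-- B pads each column number with ljust and transposes, removing A's per-cell length branch; objective: simpler.
-- ===== PORT A =====
def build_enumeration (width : Int) : String :=
  let columns := (PySem.List.pyRange 1 (width + 1) 1).map (fun x => (PySem.Int.toStr x).toList)
  let topLen := ((PySem.List.pyGet? columns (width - 1)).getD []).length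
  (PySem.List.pyRange 0 (topLen : Int) 1).foldl (fun s d =>
    ((PySem.List.pyRange 0 width 1).foldl (fun s n =>
      let col := PySem.List.pyGetD columns n []
      if d < (col.length : Int) then
        s ++ " " ++ String.ofList [PySem.List.pyGetD col d ' '] ++ " "
      else
        s ++ "   ") s) ++ "\n") ""

-- ===== PORT B =====
def build_enumeration_alt (width : Int) : String :=
  let nums := (PySem.List.pyRange 1 (width + 1) 1).map (fun x => (PySem.Int.toStr x).toList)
  let maxd := ((PySem.List.pyGet? nums (-1)).getD []).length
  let padded := nums.map (fun n => n ++ List.replicate (maxd - n.length) ' ')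
  let rows := (List.range maxd).map (fun d => padded.map (fun p => p.getD d ' '))  -- zip(*padded)
  String.join (rows.map (fun row =>
    String.join (row.map (fun ch => " " ++ String.ofList [ch] ++ " ")) ++ "\n"))

-- ===== PRECONDITION & SPEC =====
-- Pre_ excludes width ≤ 0, on which both A and B raise IndexError (columns[width-1] / nums[-1] on an empty list).
def Pre_build_enumeration (width : Int) : Prop := 1 ≤ width
instance (width : Int) : Decidable (Pre_build_enumeration width) := by unfold Pre_build_enumeration; infer_instance
def pvWitness_build_enumeration : Int := 12
def Spec_build_enumeration (width : Int) (out : String) : Prop := out = build_enumeration_alt width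
instance (width : Int) (out : String) : Decidable (Spec_build_enumeration width out) := by unfold Spec_build_enumeration; infer_instance

-- ===== CLAIM (what is proved, stated in full; the proofs are below) =====
def Claim_equal_build_enumeration : Prop := ∀ (width : Int), Dom_build_enumeration width → Pre_build_enumeration width → Spec_build_enumeration width (build_enumeration width)

-- ===== LEMMAS AND PROOFS =====

lemma join_cons (x : String) (l : List String) : String.join (x :: l) = x ++ String.join l := by
  induction l generalizing x with
  | nil => simp [String.join]
  | cons y t ih =>
    have h1 : String.join (x :: y :: t) = String.join ((x ++ y) :: t) := by
      simp [String.join, List.foldl]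
    rw [h1, ih, ih, String.append_assoc]

-- a string-accumulating fold is the join of the mapped pieces
lemma foldl_strcat {α : Type} (l : List α) (g : α → String) (s : String) :
    l.foldl (fun s c => s ++ g c) s = s ++ String.join (l.map g) := by
  induction l generalizing s with
  | nil => simp [String.join]
  | cons h t ih => rw [List.foldl_cons, ih, List.map_cons, join_cons, ← String.append_assoc]

-- the whole accumulated string is the join of the rows
lemma foldl_join {α : Type} (l : List α) (g : α → String) :
    l.foldl (fun s c => s ++ g c) "" = String.join (l.map g) := by
  rw [String.join, ← List.foldl_map]

-- A's cell (length test + index) equals B's cell (padded char)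
lemma cell_eq (c : List Char) (D k : Nat) :
    (if (k : Int) < (c.length : Int) then
        " " ++ String.ofList [PySem.List.pyGetD c (k : Int) ' '] ++ " "
      else "   ")
    = " " ++ String.ofList [(c ++ List.replicate (D - c.length) ' ').getD k ' '] ++ " " := by
  by_cases hk : k < c.length
  · rw [if_pos (by exact_mod_cast hk)]
    rw [PySem.List.pyGetD_natCast]
    congr 2
    simp [List.getD, List.getElem?_append_left hk]
  · rw [if_neg (by omega)]
    have hpad : (c ++ List.replicate (D - c.length) ' ').getD k ' ' = ' ' := by
      rcases Nat.lt_or_ge k (c.length + (D - c.length)) with h | h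
      · have hk2 : k - c.length < D - c.length := by omega
        simp [List.getD, List.getElem?_append_right (by omega : c.length ≤ k), hk2]
      · rw [List.getD, List.getElem?_eq_none (by simp; omega)]
        rfl
    rw [hpad]
    decide

-- ===== VERDICT (by name: the statement is the Claim_ definition above) =====
theorem build_enumeration_spec : Claim_equal_build_enumeration := by
  intro width _ hpre
  have hW : 1 ≤ width := hpre
  unfold Spec_build_enumeration build_enumeration build_enumeration_alt
  dsimp only
  set columns := (PySem.List.pyRange 1 (width + 1) 1).map (fun x => (PySem.Int.toStr x).toList) with hcols
  have hlen : columns.length = width.toNat := by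
    simp [hcols, PySem.List.length_pyRange_one]
  have hne : columns ≠ [] := by
    intro h; rw [h] at hlen; simp at hlen; omega
  have h1 : (width - 1) < (columns.length : Int) := by rw [hlen]; omega
  clear_value columns
  have hidx : PySem.List.pyGet? columns (width - 1) = some (columns.getLast hne) := by
    rw [PySem.List.pyGet?_eq_some_getElem columns (by omega) h1]
    rw [List.getLast_eq_getElem]
    have hix : (width - 1).toNat = columns.length - 1 := by rw [hlen]; omega
    simp only [hix]
  have hneg : PySem.List.pyGet? columns (-1) = some (columns.getLast hne) := by
    rw [PySem.List.pyGet?_neg_one, List.getLast?_eq_some_getLast hne]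
  rw [hidx, hneg]
  simp only [Option.getD_some]
  set D := (columns.getLast hne).length with hD
  -- inner fold over range(width) = fold over the columns list, as a join
  have hinner : ∀ (d : Int) (s : String),
      ((PySem.List.pyRange 0 width 1).foldl (fun s n =>
        let col := PySem.List.pyGetD columns n []
        if d < (col.length : Int) then
          s ++ " " ++ String.ofList [PySem.List.pyGetD col d ' '] ++ " "
        else s ++ "   ") s)
      = s ++ String.join (columns.map (fun col =>
          if d < (col.length : Int) then
            " " ++ String.ofList [PySem.List.pyGetD col d ' '] ++ " "
          else "   ")) := by
    intro d s
    have hw : width = (columns.length : Int) := by rw [hlen]; omega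
    rw [hw]
    rw [PySem.List.foldl_pyRange_zero_pyGetD' columns []
      (fun s col => if d < (col.length : Int) then
          s ++ " " ++ String.ofList [PySem.List.pyGetD col d ' '] ++ " "
        else s ++ "   ") s]
    rw [show (fun (s : String) (col : List Char) => if d < (col.length : Int) then
          s ++ " " ++ String.ofList [PySem.List.pyGetD col d ' '] ++ " "
        else s ++ "   ")
        = fun s col => s ++ (if d < (col.length : Int) then
          " " ++ String.ofList [PySem.List.pyGetD col d ' '] ++ " "
        else "   ") from by
      funext s col
      split
      · simp [String.append_assoc]
      · rfl]
    rw [foldl_strcat]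
  simp only [hinner]
  -- outer fold as a join of rows
  rw [show (fun (s : String) (d : Int) =>
      (s ++ String.join (columns.map (fun col =>
        if d < (col.length : Int) then
          " " ++ String.ofList [PySem.List.pyGetD col d ' '] ++ " "
        else "   "))) ++ "\n")
    = fun s d => s ++ (String.join (columns.map (fun col =>
        if d < (col.length : Int) then
          " " ++ String.ofList [PySem.List.pyGetD col d ' '] ++ " "
        else "   ")) ++ "\n") from by
      funext s d; rw [String.append_assoc]]
  rw [foldl_join]
  rw [PySem.List.pyRange_zero_natCast]
  rw [List.map_map, List.map_map]
  congr 1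
  apply List.map_congr_left
  intro k _
  simp only [Function.comp]
  congr 2
  rw [List.map_map, List.map_map]
  apply List.map_congr_left
  intro c _
  exact cell_eq c D k
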